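-- pv_equiv track=rewrite | github.com/TheVoid3301/AlgorithmStudy | leetcode/LCR 139. 训练计划 I.py | trainingPlan
-- ===== SOURCE A (Python) =====
-- from typing import List
--
-- def trainingPlan(actions: List[int]) -> List[int]:
--     res = []
--     for i in actions:
--         if i % 2 == 1:
--             res.insert(0, i)
--         else:
--             res.append(i)
--     return res
-- ===== SOURCE B (Python) =====
-- from typing import List
--
-- def trainingPlan(actions: List[int]) -> List[int]:
--     odds = []
--     evens = []
--     for i in actions:
--         if i % 2 == 1:
--             odds.append(i)
--         else:
--             evens.append(i)
--     return odds[::-1] + evens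
-- ===== Notes on version B (the rewrite author's own statement) =====
-- stated objective: faster
-- what changed: Replace A's res.insert(0, i) inside the loop (O(n) shift per odd element, O(n^2) total) by one pass collecting odds and evens into two appended lists, returning reversed(odds)+evens.
import Mathlib
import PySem

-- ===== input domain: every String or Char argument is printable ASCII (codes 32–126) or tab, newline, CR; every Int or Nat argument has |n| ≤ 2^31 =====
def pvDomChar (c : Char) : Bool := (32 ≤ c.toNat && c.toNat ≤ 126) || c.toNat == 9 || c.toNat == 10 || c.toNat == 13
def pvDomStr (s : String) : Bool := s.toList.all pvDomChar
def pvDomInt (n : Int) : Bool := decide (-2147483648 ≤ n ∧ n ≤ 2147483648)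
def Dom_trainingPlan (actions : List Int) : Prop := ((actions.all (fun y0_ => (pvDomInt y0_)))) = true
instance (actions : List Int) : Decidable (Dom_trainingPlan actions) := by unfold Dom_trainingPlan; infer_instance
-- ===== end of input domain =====

-- B replaces A's quadratic res.insert(0, i) loop by one pass into two appended lists, returning reversed(odds)+evens (faster).

-- ===== PORT A =====
-- res.insert(0, i) prepends; res.append(i) appends at the end.
def trainingPlan (actions : List Int) : List Int :=
  actions.foldl (fun res i => if PySem.Int.mod i 2 = 1 then i :: res else res ++ [i]) []

-- ===== PORT B =====
-- one pass appending into odds/evens; odds[::-1] + evens at the end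
def trainingPlan_alt (actions : List Int) : List Int :=
  let p := actions.foldl
    (fun (p : List Int × List Int) i =>
      if PySem.Int.mod i 2 = 1 then (p.1 ++ [i], p.2) else (p.1, p.2 ++ [i]))
    ([], [])
  p.1.reverse ++ p.2

-- ===== PRECONDITION & SPEC =====
def Spec_trainingPlan (actions : List Int) (out : List Int) : Prop := out = trainingPlan_alt actions
instance (actions : List Int) (out : List Int) : Decidable (Spec_trainingPlan actions out) := by unfold Spec_trainingPlan; infer_instance

-- ===== CLAIM (what is proved, stated in full; the proofs are below) =====
def Claim_equal_trainingPlan : Prop := ∀ (actions : List Int), Dom_trainingPlan actions → Spec_trainingPlan actions (trainingPlan actions)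

-- ===== LEMMAS AND PROOFS =====
theorem trainingPlan_inv (actions odds evens : List Int) :
    actions.foldl (fun res i => if PySem.Int.mod i 2 = 1 then i :: res else res ++ [i])
      (odds.reverse ++ evens)
    = (actions.foldl
        (fun (p : List Int × List Int) i =>
          if PySem.Int.mod i 2 = 1 then (p.1 ++ [i], p.2) else (p.1, p.2 ++ [i]))
        (odds, evens)).1.reverse
      ++ (actions.foldl
        (fun (p : List Int × List Int) i =>
          if PySem.Int.mod i 2 = 1 then (p.1 ++ [i], p.2) else (p.1, p.2 ++ [i]))
        (odds, evens)).2 := by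
  induction actions generalizing odds evens with
  | nil => simp
  | cons a t ih =>
    simp only [List.foldl_cons]
    by_cases h : PySem.Int.mod a 2 = 1
    · simp only [if_pos h]
      simpa using ih (odds ++ [a]) evens
    · simp only [if_neg h]
      simpa using ih odds (evens ++ [a])

-- ===== VERDICT (by name: the statement is the Claim_ definition above) =====
theorem trainingPlan_spec : Claim_equal_trainingPlan := by
  intro actions _
  unfold Spec_trainingPlan trainingPlan trainingPlan_alt
  simpa using trainingPlan_inv actions [] []
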